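-- pv_equiv track=rewrite | github.com/patrikmitterpach/algorithmicProblems | Python/Medium/interestingMileage.py | sequentialInts
-- ===== SOURCE A (Python) =====
-- def sequentialInts(number, reverse):
--     if number < 100:
--             return False
--     numList = [int(digit) for digit in str(number)]
--
--     if reverse:
--         numList = numList[::-1]
--
--     for i in range( 1, len(numList) ):
--         if numList[i]-1 == numList[i-1] or (numList[i] == 0 and numList[i-1] == 9 and not reverse):
--             pass
--         else:
--             return False
--     return True
-- ===== SOURCE B (Python) =====
-- def sequentialInts(number, reverse):
--     if number < 100:
--         return False
--     s = str(number)
--     if reverse: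
--         s = s[::-1]
--     start = int(s[0])
--     if reverse:
--         expected = ''.join(str(start + i) for i in range(len(s)))
--     else:
--         expected = ''.join(str((start + i) % 10) for i in range(len(s)))
--     return s == expected
-- ===== Notes on version B (the rewrite author's own statement) =====
-- stated objective: alternative
-- what changed: A walks adjacent digit pairs with an early-exit loop; B instead generates the expected sequential digit string from the first digit (with mod-10 wraparound in the non-reversed case) and compares it to the whole string at once.
import Mathlib
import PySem

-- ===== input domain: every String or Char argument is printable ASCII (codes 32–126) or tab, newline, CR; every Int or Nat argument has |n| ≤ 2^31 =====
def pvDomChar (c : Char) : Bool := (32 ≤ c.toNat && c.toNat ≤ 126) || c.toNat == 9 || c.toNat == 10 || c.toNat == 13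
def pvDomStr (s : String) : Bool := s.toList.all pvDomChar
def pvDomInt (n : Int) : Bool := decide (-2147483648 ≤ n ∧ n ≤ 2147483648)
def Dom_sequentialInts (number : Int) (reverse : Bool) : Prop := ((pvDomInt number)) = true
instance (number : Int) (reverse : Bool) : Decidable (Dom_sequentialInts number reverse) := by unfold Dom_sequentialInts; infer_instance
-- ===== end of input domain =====

-- B replaces A's adjacent-pairwise digit loop by generating the expected sequential
-- digit string from the first digit and comparing it whole (objective: alternative).

-- ===== PORT A =====
-- int(digit) for a one-character string; the `.getD 0` default is unreachable in A's
-- use (the chars come from str(number) with number ≥ 100, hence are digits).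
def pvDigitVal (c : Char) : Int := (PySem.Int.ofStr? (String.ofList [c])).getD 0

-- the `for i in range(1, len(numList))` adjacent-pair loop with early `return False`
def pvSeqLoop (reverse : Bool) : Int → List Int → Bool
  | _, [] => true
  | prev, x :: rest =>
    if (x - 1 == prev) || (x == 0 && prev == 9 && !reverse) then pvSeqLoop reverse x rest
    else false

def sequentialInts (number : Int) (reverse : Bool) : Bool :=
  if number < 100 then false
  else
    let numList := (PySem.Int.toChars number).map pvDigitVal
    let numList := if reverse then numList.reverse else numList
    match numList with
    | [] => true
    | d :: ds => pvSeqLoop reverse d ds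

-- ===== PORT B =====
-- s[::-1] is List.reverse; int(s[0]) via pyGet? (the getD defaults are unreachable:
-- s is nonempty since number ≥ 100); ''.join over range(len(s)) is map + flatten.
def sequentialInts_alt (number : Int) (reverse : Bool) : Bool :=
  if number < 100 then false
  else
    let s := PySem.Int.toChars number
    let s := if reverse then s.reverse else s
    let start := pvDigitVal ((PySem.List.pyGet? s 0).getD '0')
    let expected :=
      if reverse then
        ((List.range s.length).map (fun i : Nat => PySem.Int.toChars (start + (i : Int)))).flatten
      else
        ((List.range s.length).map
          (fun i : Nat => PySem.Int.toChars (PySem.Int.mod (start + (i : Int)) 10))).flatten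
    decide (s = expected)

-- ===== PRECONDITION & SPEC =====
def Spec_sequentialInts (number : Int) (reverse : Bool) (out : Bool) : Prop := out = sequentialInts_alt number reverse
instance (number : Int) (reverse : Bool) (out : Bool) : Decidable (Spec_sequentialInts number reverse out) := by unfold Spec_sequentialInts; infer_instance

-- ===== CLAIM (what is proved, stated in full; the proofs are below) =====
def Claim_equal_sequentialInts : Prop := ∀ (number : Int) (reverse : Bool), Dom_sequentialInts number reverse → Spec_sequentialInts number reverse (sequentialInts number reverse)

-- ===== LEMMAS AND PROOFS =====

lemma pv_toDigitsCore_succ (f n : Nat) (l : List Char) :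
    Nat.toDigitsCore 10 (f+1) n l =
      (if n / 10 = 0 then Nat.digitChar (n % 10) :: l
       else Nat.toDigitsCore 10 f (n / 10) (Nat.digitChar (n % 10) :: l)) := by
  rw [Nat.toDigitsCore]

lemma pv_toDigitsCore_digits (f : Nat) : ∀ (n : Nat) (l : List Char),
    (∀ c ∈ l, ∃ d : Nat, d < 10 ∧ c = Nat.digitChar d) →
    ∀ c ∈ Nat.toDigitsCore 10 f n l, ∃ d : Nat, d < 10 ∧ c = Nat.digitChar d := by
  induction f with
  | zero => intro n l hl; simpa [Nat.toDigitsCore] using hl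
  | succ f ih =>
    intro n l hl c hc
    rw [pv_toDigitsCore_succ] at hc
    by_cases h0 : n / 10 = 0
    · rw [if_pos h0] at hc
      rcases List.mem_cons.mp hc with h | h
      · exact ⟨n % 10, Nat.mod_lt _ (by norm_num), h⟩
      · exact hl c h
    · rw [if_neg h0] at hc
      refine ih (n / 10) _ ?_ c hc
      intro c' hc'
      rcases List.mem_cons.mp hc' with h | h
      · exact ⟨n % 10, Nat.mod_lt _ (by norm_num), h⟩
      · exact hl c' h

lemma pv_digits_toChars (n : Int) (hn : 0 ≤ n) :
    ∀ c ∈ PySem.Int.toChars n, ∃ d : Nat, d < 10 ∧ c = Nat.digitChar d := by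
  have : ¬ n < 0 := by omega
  simp only [PySem.Int.toChars, this, if_false, Nat.toDigits]
  exact pv_toDigitsCore_digits _ _ _ (by simp)

lemma pv_val_digitChar (d : Nat) (h : d < 10) : pvDigitVal (Nat.digitChar d) = (d : Int) := by
  interval_cases d <;> decide

lemma pv_toChars_small (k : Int) (h0 : 0 ≤ k) (h9 : k < 10) :
    PySem.Int.toChars k = [Nat.digitChar k.toNat] := by
  interval_cases k <;> decide

lemma pv_digitChar_inj (d e : Nat) (hd : d < 10) (he : e < 10) :
    Nat.digitChar d = Nat.digitChar e ↔ d = e := by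
  interval_cases d <;> interval_cases e <;> decide

lemma pv_mod_ten (a : Int) : PySem.Int.mod a 10 = a % 10 := by
  simp [PySem.Int.mod, Int.fmod_eq_emod]

lemma pv_toDigitsCore_len (f : Nat) : ∀ (n : Nat) (l : List Char), 1 ≤ f →
    l.length + 1 ≤ (Nat.toDigitsCore 10 f n l).length := by
  induction f with
  | zero => intro n l h; omega
  | succ f ih =>
    intro n l _
    rw [pv_toDigitsCore_succ]
    by_cases h0 : n / 10 = 0
    · simp [h0]
    · rw [if_neg h0]
      rcases Nat.eq_zero_or_pos f with hf | hf
      · subst hf; simp [Nat.toDigitsCore]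
      · have := ih (n / 10) (Nat.digitChar (n % 10) :: l) hf
        simp at this ⊢
        omega

lemma pv_toChars_len_ge_two (k : Int) (h : 10 ≤ k) : 2 ≤ (PySem.Int.toChars k).length := by
  have hneg : ¬ k < 0 := by omega
  simp only [PySem.Int.toChars, hneg, if_false, Nat.toDigits]
  have h10 : 10 ≤ k.toNat := by omega
  have hne : ¬ k.toNat / 10 = 0 := by omega
  obtain ⟨m, hm⟩ : ∃ m, k.toNat = m + 1 := ⟨k.toNat - 1, by omega⟩
  rw [hm, pv_toDigitsCore_succ, if_neg (by omega)]
  have := pv_toDigitsCore_len (m+1) ((m+1) / 10) [Nat.digitChar ((m+1) % 10)] (by omega)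
  simpa using this

lemma pv_flat_len (a : Int) (ha : 10 ≤ a) : ∀ n : Nat,
    2 * n ≤ (((List.range n).map (fun i : Nat => PySem.Int.toChars (a + (i : Int)))).flatten).length := by
  intro n
  induction n with
  | zero => simp
  | succ n ih =>
    rw [List.range_succ, List.map_append, List.flatten_append]
    have h2 := pv_toChars_len_ge_two (a + (n : Int)) (by omega)
    simp only [List.map_cons, List.map_nil, List.flatten_cons, List.flatten_nil,
      List.append_nil, List.length_append]
    omega

lemma pv_loop_wrap (cs : List Char) : ∀ prev : Int,
    (∀ c ∈ cs, ∃ d : Nat, d < 10 ∧ c = Nat.digitChar d) → 0 ≤ prev → prev < 10 →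
    pvSeqLoop false prev (cs.map pvDigitVal)
      = decide (cs = ((List.range cs.length).map
          (fun i : Nat => PySem.Int.toChars (PySem.Int.mod (prev + 1 + (i : Int)) 10))).flatten) := by
  induction cs with
  | nil => intro prev _ _ _; simp [pvSeqLoop]
  | cons c cs ih =>
    intro prev hdig h0 h9
    obtain ⟨d, hd, rfl⟩ := hdig c (List.mem_cons_self)
    have hdig' : ∀ c ∈ cs, ∃ d : Nat, d < 10 ∧ c = Nat.digitChar d :=
      fun c hc => hdig c (List.mem_cons_of_mem _ hc)
    have hmod : PySem.Int.mod (prev + 1 + ((0 : Nat) : Int)) 10 = (prev + 1) % 10 := by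
      rw [pv_mod_ten]; norm_num
    have he0 : 0 ≤ (prev + 1) % 10 := by omega
    have he9 : (prev + 1) % 10 < 10 := by omega
    have hhead : PySem.Int.toChars (PySem.Int.mod (prev + 1 + ((0 : Nat) : Int)) 10)
        = [Nat.digitChar ((prev + 1) % 10).toNat] := by
      rw [hmod, pv_toChars_small _ he0 he9]
    simp only [List.length_cons, List.range_succ_eq_map, List.map_cons, List.map_map,
      List.flatten_cons, List.map_cons, pvSeqLoop, pv_val_digitChar d hd, hhead,
      List.singleton_append]
    by_cases hc : (d : Int) = (prev + 1) % 10
    · have hcond : (((d : Int) - 1 == prev) || ((d : Int) == 0 && prev == 9 && !false)) = true := by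
        simp
        omega
      rw [if_pos hcond, ih (d : Int) hdig' (by omega) (by omega)]
      have hmap : (List.range cs.length).map
            ((fun i : Nat => PySem.Int.toChars (PySem.Int.mod (prev + 1 + (i : Int)) 10)) ∘ Nat.succ)
          = (List.range cs.length).map
            (fun i : Nat => PySem.Int.toChars (PySem.Int.mod ((d : Int) + 1 + (i : Int)) 10)) := by
        refine List.map_congr_left ?_
        intro i _
        simp only [Function.comp]
        congr 1
        rw [pv_mod_ten, pv_mod_ten]
        push_cast
        omega
      rw [hmap]
      have hdchar : Nat.digitChar d = Nat.digitChar ((prev + 1) % 10).toNat := by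
        congr 1; omega
      rw [hdchar]
      simp [List.cons.injEq]
    · rw [if_neg (by simp; omega)]
      have hne : Nat.digitChar d ≠ Nat.digitChar ((prev + 1) % 10).toNat := by
        rw [ne_eq, pv_digitChar_inj d _ hd (by omega)]
        omega
      symm
      simp only [decide_eq_false_iff_not]
      intro habs
      exact hne (by injection habs)

lemma pv_loop_norev (cs : List Char) : ∀ prev : Int,
    (∀ c ∈ cs, ∃ d : Nat, d < 10 ∧ c = Nat.digitChar d) → 0 ≤ prev → prev < 10 →
    pvSeqLoop true prev (cs.map pvDigitVal)
      = decide (cs = ((List.range cs.length).map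
          (fun i : Nat => PySem.Int.toChars (prev + 1 + (i : Int)))).flatten) := by
  induction cs with
  | nil => intro prev _ _ _; simp [pvSeqLoop]
  | cons c cs ih =>
    intro prev hdig h0 h9
    obtain ⟨d, hd, rfl⟩ := hdig c (List.mem_cons_self)
    have hdig' : ∀ c ∈ cs, ∃ d : Nat, d < 10 ∧ c = Nat.digitChar d :=
      fun c hc => hdig c (List.mem_cons_of_mem _ hc)
    by_cases h8 : prev < 9
    · -- prev + 1 is still a digit
      have hhead : PySem.Int.toChars (prev + 1 + ((0 : Nat) : Int))
          = [Nat.digitChar (prev + 1).toNat] := by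
        rw [show prev + 1 + ((0 : Nat) : Int) = prev + 1 by norm_num,
          pv_toChars_small _ (by omega) (by omega)]
      simp only [List.length_cons, List.range_succ_eq_map, List.map_cons, List.map_map,
        List.flatten_cons, pvSeqLoop, pv_val_digitChar d hd, hhead, List.singleton_append]
      by_cases hc : (d : Int) = prev + 1
      · have hcond : (((d : Int) - 1 == prev) || ((d : Int) == 0 && prev == 9 && !true)) = true := by
          simp
          omega
        rw [if_pos hcond, ih (d : Int) hdig' (by omega) (by omega)]
        have hmap : (List.range cs.length).map
              ((fun i : Nat => PySem.Int.toChars (prev + 1 + (i : Int))) ∘ Nat.succ)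
            = (List.range cs.length).map
              (fun i : Nat => PySem.Int.toChars ((d : Int) + 1 + (i : Int))) := by
          refine List.map_congr_left ?_
          intro i _
          simp only [Function.comp]
          congr 1
          push_cast
          omega
        rw [hmap]
        have hdchar : Nat.digitChar d = Nat.digitChar (prev + 1).toNat := by
          congr 1; omega
        rw [hdchar]
        simp [List.cons.injEq]
      · rw [if_neg (by simp; omega)]
        have hne : Nat.digitChar d ≠ Nat.digitChar (prev + 1).toNat := by
          rw [ne_eq, pv_digitChar_inj d _ hd (by omega)]
          omega
        symm
        simp only [decide_eq_false_iff_not]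
        intro habs
        exact hne (by injection habs)
    · -- prev = 9: A's loop rejects (no wraparound when reversed); B's expected string is too long
      have h9' : prev = 9 := by omega
      simp only [List.map_cons, pvSeqLoop, pv_val_digitChar d hd]
      rw [if_neg (by simp; omega)]
      have hlen := pv_flat_len (prev + 1) (by omega) (cs.length + 1)
      symm
      simp only [decide_eq_false_iff_not]
      intro habs
      have : (Nat.digitChar d :: cs).length
          = (((List.range (Nat.digitChar d :: cs).length).map
              (fun i : Nat => PySem.Int.toChars (prev + 1 + (i : Int)))).flatten).length := by
        rw [← habs]
      simp only [List.length_cons] at this hlen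
      omega

-- ===== VERDICT (by name: the statement is the Claim_ definition above) =====
theorem sequentialInts_spec : Claim_equal_sequentialInts := by
  intro number reverse _
  unfold Spec_sequentialInts
  unfold sequentialInts sequentialInts_alt
  by_cases hlt : number < 100
  · simp [hlt]
  · simp only [hlt, if_false]
    have hdig := pv_digits_toChars number (by omega)
    cases reverse with
    | false =>
      simp only [Bool.false_eq_true, if_false]
      cases hcs : PySem.Int.toChars number with
      | nil => simp [pvDigitVal]
      | cons c0 rest =>
        rw [hcs] at hdig
        obtain ⟨d0, hd0, hc0⟩ := hdig c0 List.mem_cons_self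
        subst hc0
        have hdig' : ∀ c ∈ rest, ∃ d : Nat, d < 10 ∧ c = Nat.digitChar d :=
          fun c hc => hdig c (List.mem_cons_of_mem _ hc)
        have hhead : PySem.Int.toChars (PySem.Int.mod ((d0 : Int) + ((0 : Nat) : Int)) 10)
            = [Nat.digitChar d0] := by
          rw [pv_mod_ten]
          rw [show ((d0 : Int) + ((0 : Nat) : Int)) % 10 = (d0 : Int) by omega,
            pv_toChars_small _ (by omega) (by omega)]
          simp
        simp only [List.map_cons, PySem.List.pyGet?_zero_cons, Option.getD_some,
          pv_val_digitChar d0 hd0, List.length_cons, List.range_succ_eq_map, List.map_map,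
          List.flatten_cons, hhead, List.singleton_append]
        rw [pv_loop_wrap rest (d0 : Int) hdig' (by omega) (by omega)]
        have hmap : (List.range rest.length).map
              ((fun i : Nat => PySem.Int.toChars (PySem.Int.mod ((d0 : Int) + (i : Int)) 10)) ∘ Nat.succ)
            = (List.range rest.length).map
              (fun i : Nat => PySem.Int.toChars (PySem.Int.mod ((d0 : Int) + 1 + (i : Int)) 10)) := by
          refine List.map_congr_left ?_
          intro i _
          simp only [Function.comp]
          congr 1
          rw [pv_mod_ten, pv_mod_ten]
          push_cast
          omega
        rw [hmap]
        simp [List.cons.injEq]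
    | true =>
      simp only [if_true]
      rw [show ((PySem.Int.toChars number).map pvDigitVal).reverse
          = (PySem.Int.toChars number).reverse.map pvDigitVal by
        rw [List.map_reverse]]
      have hdigr : ∀ c ∈ (PySem.Int.toChars number).reverse, ∃ d : Nat, d < 10 ∧ c = Nat.digitChar d :=
        fun c hc => hdig c (List.mem_reverse.mp hc)
      cases hcs : (PySem.Int.toChars number).reverse with
      | nil => simp [pvDigitVal]
      | cons c0 rest =>
        rw [hcs] at hdigr
        obtain ⟨d0, hd0, hc0⟩ := hdigr c0 List.mem_cons_self
        subst hc0
        have hdig' : ∀ c ∈ rest, ∃ d : Nat, d < 10 ∧ c = Nat.digitChar d :=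
          fun c hc => hdigr c (List.mem_cons_of_mem _ hc)
        have hhead : PySem.Int.toChars ((d0 : Int) + ((0 : Nat) : Int))
            = [Nat.digitChar d0] := by
          rw [show ((d0 : Int) + ((0 : Nat) : Int)) = (d0 : Int) by omega,
            pv_toChars_small _ (by omega) (by omega)]
          simp
        simp only [List.map_cons, PySem.List.pyGet?_zero_cons, Option.getD_some,
          pv_val_digitChar d0 hd0, List.length_cons, List.range_succ_eq_map, List.map_map,
          List.flatten_cons, hhead, List.singleton_append]
        rw [pv_loop_norev rest (d0 : Int) hdig' (by omega) (by omega)]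
        have hmap : (List.range rest.length).map
              ((fun i : Nat => PySem.Int.toChars ((d0 : Int) + (i : Int))) ∘ Nat.succ)
            = (List.range rest.length).map
              (fun i : Nat => PySem.Int.toChars ((d0 : Int) + 1 + (i : Int))) := by
          refine List.map_congr_left ?_
          intro i _
          simp only [Function.comp]
          congr 1
          push_cast
          omega
        rw [hmap]
        simp [List.cons.injEq]
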